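-- pv_equiv track=rewrite | github.com/husthunterpy01/Dialog-Summarization-System | chatbot/utils/semanticembedding_utils.py | _combine_sentences
-- ===== SOURCE A (Python) =====
-- def _combine_sentences(sentences):
--     combined_sentences = []
--     for i in range(len(sentences)):
--         combined_sentence = sentences[i]
--         if i > 0:
--             combined_sentence = sentences[i - 1] + ' ' + combined_sentence
--         if i < len(sentences) - 1:
--             combined_sentence += ' ' + sentences[i + 1]
--         combined_sentences.append(combined_sentence)
--     return combined_sentences
-- ===== SOURCE B (Python) =====
-- def _combine_sentences(sentences):
--     if not sentences:
--         return []
--     # stage 1: join each sentence with its successor (last one stays alone)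
--     with_next = [c + ' ' + n for c, n in zip(sentences, sentences[1:])] + [sentences[-1]]
--     # stage 2: prepend each predecessor (first one stays as built)
--     return with_next[:1] + [p + ' ' + c for p, c in zip(sentences, with_next[1:])]
-- ===== Notes on version B (the rewrite author's own statement) =====
-- stated objective: alternative
-- what changed: Replaced the single index loop with neighbor-existence branches by two staged index-free passes: a zip of the list with its shifted self joins each sentence to its successor, then a second zip prepends each predecessor.
import Mathlib
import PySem

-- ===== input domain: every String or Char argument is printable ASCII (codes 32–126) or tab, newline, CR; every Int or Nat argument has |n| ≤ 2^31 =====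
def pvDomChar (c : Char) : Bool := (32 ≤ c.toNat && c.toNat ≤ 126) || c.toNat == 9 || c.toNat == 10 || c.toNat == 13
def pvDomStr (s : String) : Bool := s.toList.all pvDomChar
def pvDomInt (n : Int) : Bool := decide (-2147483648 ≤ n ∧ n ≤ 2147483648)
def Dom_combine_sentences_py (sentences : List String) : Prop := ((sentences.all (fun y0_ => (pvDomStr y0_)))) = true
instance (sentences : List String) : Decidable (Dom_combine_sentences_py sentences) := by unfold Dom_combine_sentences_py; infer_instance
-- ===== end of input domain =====

-- B replaces the index loop with neighbor-existence branches by two staged zip-with-shifted-self passes (objective: alternative); return values proved equal on all inputs in Dom.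

-- ===== PORT A =====
def combine_sentences_py (sentences : List String) : List String :=
  (PySem.List.pyRange 0 (sentences.length : Int) 1).foldl (fun combined_sentences i =>
    let c0 := PySem.List.pyGetD sentences i ""
    let c1 := if i > 0 then PySem.List.pyGetD sentences (i-1) "" ++ " " ++ c0 else c0
    let c2 := if i < (sentences.length : Int) - 1 then c1 ++ " " ++ PySem.List.pyGetD sentences (i+1) "" else c1
    combined_sentences ++ [c2]) []

-- ===== PORT B =====
-- zip(xs, xs[1:]) → List.zip xs (xs.drop 1); the slices [:1] / [1:] → take 1 / drop 1 (exact for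
-- nonnegative in-range bounds); sentences[-1] → PySem.List.pyGetD sentences (-1) "" (guarded nonempty)
def combine_sentences_py_alt (sentences : List String) : List String :=
  if sentences = [] then []
  else
    let with_next := ((sentences.zip (sentences.drop 1)).map (fun p => p.1 ++ " " ++ p.2))
      ++ [PySem.List.pyGetD sentences (-1) ""]
    with_next.take 1 ++ ((sentences.zip (with_next.drop 1)).map (fun p => p.1 ++ " " ++ p.2))

-- ===== PRECONDITION & SPEC =====
def Spec_combine_sentences_py (sentences : List String) (out : List String) : Prop := out = combine_sentences_py_alt sentences
instance (sentences : List String) (out : List String) : Decidable (Spec_combine_sentences_py sentences out) := by unfold Spec_combine_sentences_py; infer_instance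

-- ===== CLAIM =====
def Claim_equal_combine_sentences_py : Prop := ∀ (sentences : List String), Dom_combine_sentences_py sentences → Spec_combine_sentences_py sentences (combine_sentences_py sentences)

-- ===== LEMMAS AND PROOFS =====

-- the common per-index characterisation both ports are reduced to
def pvE (s : List String) (k : Nat) : String :=
  let c0 := s.getD k ""
  let c1 := if 0 < k then s.getD (k-1) "" ++ " " ++ c0 else c0
  if k + 1 < s.length then c1 ++ " " ++ s.getD (k+1) "" else c1

lemma getD_nat (s : List String) (k : Nat) (hk : k < s.length) :
    PySem.List.pyGetD s ((k:Int)) "" = s[k] := by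
  simp [List.getElem?_eq_getElem hk]

lemma A_eq (s : List String) :
    combine_sentences_py s = (List.range s.length).map (pvE s) := by
  unfold combine_sentences_py
  rw [PySem.List.foldl_append_singleton_eq_map]
  rw [PySem.List.pyRange_zero_nat, List.map_map, List.nil_append]
  apply List.map_congr_left
  intro k hk
  have hk' : k < s.length := List.mem_range.mp hk
  simp only [Function.comp, pvE]
  rw [getD_nat s k hk', List.getD_eq_getElem s "" hk']
  rcases Nat.eq_zero_or_pos k with hk0 | hkpos
  · subst hk0
    split_ifs with h1 h2 h2 <;> try (exfalso; omega)
    · rw [show ((0:Nat):Int)+1 = ((1:Nat):Int) by norm_num,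
          getD_nat s 1 (by exact_mod_cast (by omega : 1 < s.length)),
          List.getD_eq_getElem s "" (by omega : 1 < s.length)]
    · rfl
  · have e1 : ((k:Nat):Int)-1 = ((k-1:Nat):Int) := by push_cast [hkpos]; omega
    split_ifs with h1 h2 h2 <;> try (exfalso; omega)
    · rw [e1, getD_nat s (k-1) (by omega), List.getD_eq_getElem s "" (by omega : k-1 < s.length),
          show ((k:Nat):Int)+1 = ((k+1:Nat):Int) by push_cast; ring,
          getD_nat s (k+1) (by exact_mod_cast (by omega : k+1 < s.length)),
          List.getD_eq_getElem s "" (by omega : k+1 < s.length)]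
    · rw [e1, getD_nat s (k-1) (by omega), List.getD_eq_getElem s "" (by omega : k-1 < s.length)]

lemma B_eq (s : List String) :
    combine_sentences_py_alt s = (List.range s.length).map (pvE s) := by
  unfold combine_sentences_py_alt
  rcases s with _ | ⟨x, t⟩
  · simp
  · set s := x :: t with hs
    have hne : s ≠ [] := by simp [hs]
    rw [if_neg hne]
    have hn : 1 ≤ s.length := by simp [hs]
    have hlen : s.length = t.length + 1 := by simp [hs]
    have hlast : PySem.List.pyGetD s (-1) "" = s[s.length - 1]'(by omega) :=
      PySem.List.pyGetD_neg_ofNat s 1 "" (by omega) (by omega)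
    apply List.ext_getElem
    · simp [hs]; omega
    · intro k hk1 hk2
      have hk : k < s.length := by
        simpa [hs] using hk2
      have hwn : (((s.zip (s.drop 1)).map (fun p => p.1 ++ " " ++ p.2))
          ++ [PySem.List.pyGetD s (-1) ""]).length = s.length := by
        simp [hs]
      simp only [List.getElem_map, List.getElem_range]
      rcases Nat.eq_zero_or_pos k with rfl | hkpos
      · rw [List.getElem_append_left (by simp [hs])]
        rw [List.getElem_take]
        rcases t with _ | ⟨y,t'⟩
        · simp [hs, pvE, PySem.List.pyGetD, PySem.List.pyGet?, PySem.List.pyIdx?]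
        · simp [hs, pvE]
      · rw [List.getElem_append_right (by simp [hs]; omega)]
        rw [List.getElem_map, List.getElem_zip]
        have htl : (List.take 1 (List.map (fun p : String × String => p.1 ++ " " ++ p.2) (s.zip (List.drop 1 s)) ++ [PySem.List.pyGetD s (-1) ""])).length = 1 := by
          simp [hs]
        simp only [htl, List.getElem_drop]
        have hidx : 1 + (k - 1) = k := by omega
        simp only [hidx]
        by_cases hklt : k < s.length - 1
        · rw [List.getElem_append_left (by simp [hs]; omega)]
          rw [List.getElem_map, List.getElem_zip]
          simp only [List.getElem_drop]
          have h1k : 1 + k = k + 1 := by omega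
          simp only [h1k, pvE]
          rw [List.getD_eq_getElem s "" (by omega : k - 1 < s.length),
              List.getD_eq_getElem s "" hk,
              List.getD_eq_getElem s "" (by omega : k + 1 < s.length)]
          split_ifs <;> first | (exfalso; omega) | (apply String.ext; simp [String.toList_append])
        · have hke : k = s.length - 1 := by omega
          rw [List.getElem_append_right (by simp [hs]; omega)]
          have h0 : k - (List.map (fun p : String × String => p.1 ++ " " ++ p.2) (s.zip (List.drop 1 s))).length = 0 := by
            simp [hs]; omega
          simp only [h0, List.getElem_singleton, hlast, pvE]
          rw [List.getD_eq_getElem s "" (by omega : k - 1 < s.length),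
              List.getD_eq_getElem s "" hk]
          split_ifs <;> first | (exfalso; omega) | (simp only [hke])

-- ===== VERDICT =====
theorem combine_sentences_py_spec : Claim_equal_combine_sentences_py := by
  intro s _hdom
  unfold Spec_combine_sentences_py
  rw [A_eq, B_eq]
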